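-- pv_equiv track=rewrite | github.com/Clawdy01/clawdy-workspace | scripts/ai-briefing-status.py | primary_source_family
-- ===== SOURCE A (Python) =====
-- PRIMARY_SOURCE_FAMILIES = {
--     'openai.com': 'openai',
--     'anthropic.com': 'anthropic',
--     'googleblog.com': 'google',
--     'deepmind.google': 'google',
--     'ai.google.dev': 'google',
--     'developers.googleblog.com': 'google',
--     'about.fb.com': 'meta',
--     'ai.meta.com': 'meta',
--     'meta.com': 'meta',
--     'microsoft.com': 'microsoft',
--     'news.microsoft.com': 'microsoft',
--     'nvidia.com': 'nvidia',
--     'developer.nvidia.com': 'nvidia',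
--     'nvidianews.nvidia.com': 'nvidia',
--     'huggingface.co': 'huggingface',
--     'stability.ai': 'stability',
--     'runwayml.com': 'runway',
--     'midjourney.com': 'midjourney',
--     'elevenlabs.io': 'elevenlabs',
--     'x.ai': 'xai',
--     'mistral.ai': 'mistral',
--     'github.com': 'github',
--     'arxiv.org': 'arxiv',
-- }
--
-- def primary_source_family(domain):
--     if not isinstance(domain, str) or not domain:
--         return None
--     normalized = domain.lower()
--     for root, family in PRIMARY_SOURCE_FAMILIES.items():
--         if normalized == root or normalized.endswith(f'.{root}'):
--             return family
--     return None
-- ===== SOURCE B (Python) =====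
-- PRIMARY_SOURCE_FAMILIES = {
--     'openai.com': 'openai',
--     'anthropic.com': 'anthropic',
--     'googleblog.com': 'google',
--     'deepmind.google': 'google',
--     'ai.google.dev': 'google',
--     'developers.googleblog.com': 'google',
--     'about.fb.com': 'meta',
--     'ai.meta.com': 'meta',
--     'meta.com': 'meta',
--     'microsoft.com': 'microsoft',
--     'news.microsoft.com': 'microsoft',
--     'nvidia.com': 'nvidia',
--     'developer.nvidia.com': 'nvidia',
--     'nvidianews.nvidia.com': 'nvidia',
--     'huggingface.co': 'huggingface',
--     'stability.ai': 'stability',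
--     'runwayml.com': 'runway',
--     'midjourney.com': 'midjourney',
--     'elevenlabs.io': 'elevenlabs',
--     'x.ai': 'xai',
--     'mistral.ai': 'mistral',
--     'github.com': 'github',
--     'arxiv.org': 'arxiv',
-- }
--
-- def primary_source_family(domain):
--     if not isinstance(domain, str) or not domain:
--         return None
--     suffix = domain.lower()
--     boundary = True  # a label starts here: the string start or just after a '.'
--     while suffix:
--         if boundary and suffix in PRIMARY_SOURCE_FAMILIES:
--             return PRIMARY_SOURCE_FAMILIES[suffix]
--         boundary = suffix[0] == '.'
--         suffix = suffix[1:]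
--     return None
-- ===== Notes on version B (the rewrite author's own statement) =====
-- stated objective: alternative
-- what changed: A loops over all 23 dict entries doing an equality-or-endswith test per root; B instead makes one left-to-right pass over the lowercased domain, carrying a label-boundary flag, and tests each boundary suffix for dict membership — correct because overlapping roots in the table always map to the same family.
import Mathlib
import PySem

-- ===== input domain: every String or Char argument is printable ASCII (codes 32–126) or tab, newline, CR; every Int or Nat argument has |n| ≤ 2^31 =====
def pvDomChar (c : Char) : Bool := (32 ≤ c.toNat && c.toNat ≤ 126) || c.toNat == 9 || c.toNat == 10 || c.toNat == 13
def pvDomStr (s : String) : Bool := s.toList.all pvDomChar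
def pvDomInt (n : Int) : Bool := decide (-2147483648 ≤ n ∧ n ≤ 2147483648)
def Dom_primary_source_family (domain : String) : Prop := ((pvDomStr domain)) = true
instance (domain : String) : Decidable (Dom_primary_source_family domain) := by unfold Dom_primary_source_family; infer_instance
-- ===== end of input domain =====

-- B replaces A's scan over all 23 dict entries (an endswith test per root) by ONE left-to-right
-- scan of the lowercased domain that tests each label-boundary suffix for dict membership
-- (objective: alternative — the iterated collection is the domain's positions, not the table).

-- ===== PORT A =====
-- the module-level dict PRIMARY_SOURCE_FAMILIES (insertion order)
def pvTable : List (String × String) :=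
  [("openai.com", "openai"),
   ("anthropic.com", "anthropic"),
   ("googleblog.com", "google"),
   ("deepmind.google", "google"),
   ("ai.google.dev", "google"),
   ("developers.googleblog.com", "google"),
   ("about.fb.com", "meta"),
   ("ai.meta.com", "meta"),
   ("meta.com", "meta"),
   ("microsoft.com", "microsoft"),
   ("news.microsoft.com", "microsoft"),
   ("nvidia.com", "nvidia"),
   ("developer.nvidia.com", "nvidia"),
   ("nvidianews.nvidia.com", "nvidia"),
   ("huggingface.co", "huggingface"),
   ("stability.ai", "stability"),
   ("runwayml.com", "runway"),
   ("midjourney.com", "midjourney"),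
   ("elevenlabs.io", "elevenlabs"),
   ("x.ai", "xai"),
   ("mistral.ai", "mistral"),
   ("github.com", "github"),
   ("arxiv.org", "arxiv")]

def pvPSF : PySem.Dict String String := PySem.Dict.ofList pvTable

-- the 'for root, family in PRIMARY_SOURCE_FAMILIES.items()' loop
def goA (s : String) : List (String × String) → Option String
  | [] => none
  | (root, family) :: rest =>
    if s == root || PySem.Str.endswith s ("." ++ root) then some family
    else goA s rest

def primary_source_family (domain : String) : Option String :=
  if domain == "" then none
  else goA (PySem.Str.lower domain) pvPSF.items

-- ===== PORT B =====
-- Source B's 'suffix in PRIMARY_SOURCE_FAMILIES' / 'PRIMARY_SOURCE_FAMILIES[suffix]': a dict whose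
-- keys are the distinct literals of pvTable, looked up by key equality — exact, since lookup in
-- a literal-key dict is determined by string equality with its keys.
def famOf (k : String) : Option String :=
  if k = "openai.com" then some "openai"
  else if k = "anthropic.com" then some "anthropic"
  else if k = "googleblog.com" then some "google"
  else if k = "deepmind.google" then some "google"
  else if k = "ai.google.dev" then some "google"
  else if k = "developers.googleblog.com" then some "google"
  else if k = "about.fb.com" then some "meta"
  else if k = "ai.meta.com" then some "meta"
  else if k = "meta.com" then some "meta"
  else if k = "microsoft.com" then some "microsoft"
  else if k = "news.microsoft.com" then some "microsoft"
  else if k = "nvidia.com" then some "nvidia"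
  else if k = "developer.nvidia.com" then some "nvidia"
  else if k = "nvidianews.nvidia.com" then some "nvidia"
  else if k = "huggingface.co" then some "huggingface"
  else if k = "stability.ai" then some "stability"
  else if k = "runwayml.com" then some "runway"
  else if k = "midjourney.com" then some "midjourney"
  else if k = "elevenlabs.io" then some "elevenlabs"
  else if k = "x.ai" then some "xai"
  else if k = "mistral.ai" then some "mistral"
  else if k = "github.com" then some "github"
  else if k = "arxiv.org" then some "arxiv"
  else none

-- Source B's while loop: 'suffix' is the remaining char list, 'boundary' the flag carried across
-- iterations ('suffix = suffix[1:]' is the structural tail, 'suffix[0]' the head).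
def goB (boundary : Bool) (suffix : List Char) : Option String :=
  match suffix with
  | [] => none
  | c :: rest =>
    match (if boundary then famOf (String.ofList (c :: rest)) else none) with
    | some fam => some fam
    | none => goB (c == '.') rest

def primary_source_family_alt (domain : String) : Option String :=
  if domain = "" then none
  else goB true (PySem.Str.lower domain).toList

-- ===== PRECONDITION & SPEC =====
def Spec_primary_source_family (domain : String) (out : Option String) : Prop := out = primary_source_family_alt domain
instance (domain : String) (out : Option String) : Decidable (Spec_primary_source_family domain out) := by unfold Spec_primary_source_family; infer_instance

-- ===== CLAIM (what is proved, stated in full; the proofs are below) =====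
def Claim_equal_primary_source_family : Prop := ∀ (domain : String), Dom_primary_source_family domain → Spec_primary_source_family domain (primary_source_family domain)

-- ===== LEMMAS AND PROOFS =====

-- t is a "boundary suffix" of s: s itself, or a suffix immediately preceded by '.'
def Bdry (s t : List Char) : Prop := s = t ∨ ∃ p, s = p ++ '.' :: t

lemma pvPSF_eq : pvPSF = PySem.Dict.mk pvTable := by decide

lemma cond_iff_Bdry (s r : String) :
    (s == r || PySem.Str.endswith s ("." ++ r)) = true ↔ Bdry s.toList r.toList := by
  constructor
  · intro h
    rcases Bool.or_eq_true_iff.mp h with h1 | h2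
    · exact Or.inl (by rw [beq_iff_eq.mp h1])
    · right
      have h3 : ("." ++ r).toList <:+ s.toList := by
        rw [PySem.Str.endswith_eq] at h2
        exact (PySem.Chars.endswith_iff _ _).mp h2
      obtain ⟨p, hp⟩ := h3
      exact ⟨p, by simpa using hp.symm⟩
  · intro h
    rcases h with h1 | ⟨p, hp⟩
    · exact Bool.or_eq_true_iff.mpr (Or.inl (beq_iff_eq.mpr (String.ext h1)))
    · refine Bool.or_eq_true_iff.mpr (Or.inr ?_)
      rw [PySem.Str.endswith_eq]
      refine (PySem.Chars.endswith_iff _ _).mpr ⟨p, ?_⟩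
      simpa using hp.symm

lemma goA_none_iff (s : String) (L : List (String × String)) :
    goA s L = none ↔ ∀ r f, (r, f) ∈ L → (s == r || PySem.Str.endswith s ("." ++ r)) = false := by
  induction L with
  | nil => simp [goA]
  | cons rf rest ih =>
    obtain ⟨r0, f0⟩ := rf
    simp only [goA]
    by_cases hc : (s == r0 || PySem.Str.endswith s ("." ++ r0)) = true
    · rw [if_pos hc]
      constructor
      · intro h; exact absurd h (by simp)
      · intro h
        have := h r0 f0 List.mem_cons_self
        rw [hc] at this
        cases this
    · rw [if_neg hc, ih]
      have hc0 : (s == r0 || PySem.Str.endswith s ("." ++ r0)) = false := by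
        simpa using hc
      constructor
      · intro h r f hm
        rcases List.mem_cons.mp hm with h1 | h1
        · injection h1 with ha hb
          subst ha; subst hb
          exact hc0
        · exact h r f h1
      · intro h r f hm
        exact h r f (List.mem_cons_of_mem _ hm)

lemma goA_some_mem (s : String) (L : List (String × String)) (f : String)
    (h : goA s L = some f) :
    ∃ r, (r, f) ∈ L ∧ (s == r || PySem.Str.endswith s ("." ++ r)) = true := by
  induction L with
  | nil => simp [goA] at h
  | cons rf rest ih =>
    obtain ⟨r0, f0⟩ := rf
    simp only [goA] at h
    by_cases hc : (s == r0 || PySem.Str.endswith s ("." ++ r0)) = true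
    · rw [if_pos hc] at h
      injection h with h
      subst h
      exact ⟨r0, List.mem_cons_self, hc⟩
    · rw [if_neg hc] at h
      obtain ⟨r, hm, hcr⟩ := ih h
      exact ⟨r, List.mem_cons_of_mem _ hm, hcr⟩

-- every key famOf accepts is a key of the table, with the same family
set_option maxHeartbeats 1000000 in
lemma famOf_mem {k f : String} (h : famOf k = some f) : (k, f) ∈ pvTable := by
  unfold famOf at h
  by_cases h0 : k = "openai.com"
  · rw [if_pos h0] at h
    obtain rfl := Option.some.inj h
    subst h0
    decide
  rw [if_neg h0] at h
  by_cases h1 : k = "anthropic.com"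
  · rw [if_pos h1] at h
    obtain rfl := Option.some.inj h
    subst h1
    decide
  rw [if_neg h1] at h
  by_cases h2 : k = "googleblog.com"
  · rw [if_pos h2] at h
    obtain rfl := Option.some.inj h
    subst h2
    decide
  rw [if_neg h2] at h
  by_cases h3 : k = "deepmind.google"
  · rw [if_pos h3] at h
    obtain rfl := Option.some.inj h
    subst h3
    decide
  rw [if_neg h3] at h
  by_cases h4 : k = "ai.google.dev"
  · rw [if_pos h4] at h
    obtain rfl := Option.some.inj h
    subst h4
    decide
  rw [if_neg h4] at h
  by_cases h5 : k = "developers.googleblog.com"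
  · rw [if_pos h5] at h
    obtain rfl := Option.some.inj h
    subst h5
    decide
  rw [if_neg h5] at h
  by_cases h6 : k = "about.fb.com"
  · rw [if_pos h6] at h
    obtain rfl := Option.some.inj h
    subst h6
    decide
  rw [if_neg h6] at h
  by_cases h7 : k = "ai.meta.com"
  · rw [if_pos h7] at h
    obtain rfl := Option.some.inj h
    subst h7
    decide
  rw [if_neg h7] at h
  by_cases h8 : k = "meta.com"
  · rw [if_pos h8] at h
    obtain rfl := Option.some.inj h
    subst h8
    decide
  rw [if_neg h8] at h
  by_cases h9 : k = "microsoft.com"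
  · rw [if_pos h9] at h
    obtain rfl := Option.some.inj h
    subst h9
    decide
  rw [if_neg h9] at h
  by_cases h10 : k = "news.microsoft.com"
  · rw [if_pos h10] at h
    obtain rfl := Option.some.inj h
    subst h10
    decide
  rw [if_neg h10] at h
  by_cases h11 : k = "nvidia.com"
  · rw [if_pos h11] at h
    obtain rfl := Option.some.inj h
    subst h11
    decide
  rw [if_neg h11] at h
  by_cases h12 : k = "developer.nvidia.com"
  · rw [if_pos h12] at h
    obtain rfl := Option.some.inj h
    subst h12
    decide
  rw [if_neg h12] at h
  by_cases h13 : k = "nvidianews.nvidia.com"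
  · rw [if_pos h13] at h
    obtain rfl := Option.some.inj h
    subst h13
    decide
  rw [if_neg h13] at h
  by_cases h14 : k = "huggingface.co"
  · rw [if_pos h14] at h
    obtain rfl := Option.some.inj h
    subst h14
    decide
  rw [if_neg h14] at h
  by_cases h15 : k = "stability.ai"
  · rw [if_pos h15] at h
    obtain rfl := Option.some.inj h
    subst h15
    decide
  rw [if_neg h15] at h
  by_cases h16 : k = "runwayml.com"
  · rw [if_pos h16] at h
    obtain rfl := Option.some.inj h
    subst h16
    decide
  rw [if_neg h16] at h
  by_cases h17 : k = "midjourney.com"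
  · rw [if_pos h17] at h
    obtain rfl := Option.some.inj h
    subst h17
    decide
  rw [if_neg h17] at h
  by_cases h18 : k = "elevenlabs.io"
  · rw [if_pos h18] at h
    obtain rfl := Option.some.inj h
    subst h18
    decide
  rw [if_neg h18] at h
  by_cases h19 : k = "x.ai"
  · rw [if_pos h19] at h
    obtain rfl := Option.some.inj h
    subst h19
    decide
  rw [if_neg h19] at h
  by_cases h20 : k = "mistral.ai"
  · rw [if_pos h20] at h
    obtain rfl := Option.some.inj h
    subst h20
    decide
  rw [if_neg h20] at h
  by_cases h21 : k = "github.com"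
  · rw [if_pos h21] at h
    obtain rfl := Option.some.inj h
    subst h21
    decide
  rw [if_neg h21] at h
  by_cases h22 : k = "arxiv.org"
  · rw [if_pos h22] at h
    obtain rfl := Option.some.inj h
    subst h22
    decide
  rw [if_neg h22] at h
  cases h

-- every key of the table is accepted by famOf
lemma mem_famOf {k f : String} (h : (k, f) ∈ pvTable) : (famOf k).isSome = true := by
  have hall : pvTable.all (fun a => (famOf a.1).isSome) = true := by decide
  simpa using List.all_eq_true.mp hall (k, f) h

-- soundness of B's scan: a hit is a boundary suffix famOf accepts
lemma goB_some (suffix : List Char) (boundary : Bool) (f : String)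
    (h : goB boundary suffix = some f) :
    ∃ t, ((boundary = true ∧ suffix = t) ∨ ∃ p, suffix = p ++ '.' :: t) ∧
      famOf (String.ofList t) = some f := by
  induction suffix generalizing boundary with
  | nil => simp [goB] at h
  | cons c rest ih =>
    rw [goB] at h
    cases hfa : (if boundary then famOf (String.ofList (c :: rest)) else none) with
    | some f0 =>
      rw [hfa] at h
      simp only at h
      injection h with h
      subst h
      have hb : boundary = true := by
        by_contra hb
        rw [Bool.eq_false_iff.mpr hb] at hfa
        simp at hfa
      rw [hb] at hfa
      exact ⟨c :: rest, Or.inl ⟨hb, rfl⟩, by simpa using hfa⟩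
    | none =>
      rw [hfa] at h
      simp only at h
      obtain ⟨t, hrel, hf⟩ := ih (c == '.') h
      refine ⟨t, ?_, hf⟩
      rcases hrel with ⟨hb, rfl⟩ | ⟨p, rfl⟩
      · have hc : c = '.' := by simpa using hb
        exact Or.inr ⟨[], by simp [hc]⟩
      · exact Or.inr ⟨c :: p, rfl⟩

-- completeness of B's scan: no hit means famOf rejects every boundary suffix
lemma goB_none (suffix : List Char) (boundary : Bool)
    (h : goB boundary suffix = none) :
    ∀ t, ((boundary = true ∧ suffix = t) ∨ ∃ p, suffix = p ++ '.' :: t) →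
      famOf (String.ofList t) = none := by
  induction suffix generalizing boundary with
  | nil =>
    intro t hrel
    rcases hrel with ⟨_, rfl⟩ | ⟨p, hp⟩
    · decide
    · exact absurd hp (by simp)
  | cons c rest ih =>
    intro t hrel
    rw [goB] at h
    cases hfa : (if boundary then famOf (String.ofList (c :: rest)) else none) with
    | some f0 => rw [hfa] at h; simp at h
    | none =>
      rw [hfa] at h
      simp only at h
      rcases hrel with ⟨hb, rfl⟩ | ⟨p, hp⟩
      · rw [hb] at hfa
        simpa using hfa
      · cases p with
        | nil =>
          rw [List.nil_append] at hp
          obtain ⟨hc, hrest⟩ := List.cons.inj hp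
          subst hc
          exact ih ('.' == '.') h t (Or.inl ⟨by decide, hrest⟩)
        | cons c0 p' =>
          obtain ⟨hc, hrest⟩ := List.cons.inj hp
          exact ih (c == '.') h t (Or.inr ⟨p', hrest⟩)

-- finite consistency check over the table: whenever one root boundary-matches another,
-- their families coincide (this is why A's dict-order pick and B's position-order pick agree)
lemma tbl_consistent_bool :
    (pvTable.all (fun a => pvTable.all (fun b =>
      !(a.1 == b.1 || PySem.Str.endswith a.1 ("." ++ b.1)) || (a.2 == b.2)))) = true := by
  decide

lemma tbl_consistent {r1 f1 r2 f2 : String}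
    (h1 : (r1, f1) ∈ pvTable) (h2 : (r2, f2) ∈ pvTable)
    (hc : (r1 == r2 || PySem.Str.endswith r1 ("." ++ r2)) = true) : f1 = f2 := by
  have := List.all_eq_true.mp tbl_consistent_bool (r1, f1) h1
  have := List.all_eq_true.mp this (r2, f2) h2
  simp only [hc] at this
  simpa using this

lemma Bdry_comp_aux {p a q b : List Char} (h : p ++ '.' :: a = q ++ '.' :: b)
    (hl : a.length ≤ b.length) : Bdry b a := by
  have hlen : p.length + (a.length + 1) = q.length + (b.length + 1) := by
    have := congrArg List.length h
    simpa using this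
  have hq : q.length ≤ p.length := by omega
  have hp : p = p.take q.length ++ p.drop q.length := (List.take_append_drop _ _).symm
  rw [hp, List.append_assoc] at h
  have hlen2 : (p.take q.length).length = q.length := by simp; omega
  obtain ⟨h1, h2⟩ := List.append_inj h hlen2
  cases hd : p.drop q.length with
  | nil =>
    rw [hd] at h2
    simp at h2
    exact Or.inl h2.symm
  | cons c d =>
    rw [hd] at h2
    simp at h2
    obtain ⟨hc, hb⟩ := h2
    exact Or.inr ⟨d, hb.symm⟩

lemma Bdry_comparable {s a b : List Char} (h1 : Bdry s a) (h2 : Bdry s b) :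
    Bdry a b ∨ Bdry b a := by
  rcases h1 with rfl | ⟨p, rfl⟩
  · exact Or.inl h2
  · rcases h2 with h | ⟨q, hq⟩
    · exact Or.inr (Or.inr ⟨p, h.symm⟩)
    · rcases Nat.le_total a.length b.length with hl | hl
      · exact Or.inr (Bdry_comp_aux hq hl)
      · exact Or.inl (Bdry_comp_aux hq.symm hl)

lemma families_agree {s : List Char} {r1 f1 r2 f2 : String}
    (hm1 : (r1, f1) ∈ pvTable) (hm2 : (r2, f2) ∈ pvTable)
    (hb1 : Bdry s r1.toList) (hb2 : Bdry s r2.toList) : f1 = f2 := by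
  rcases Bdry_comparable hb1 hb2 with h | h
  · exact tbl_consistent hm1 hm2 ((cond_iff_Bdry r1 r2).mpr h)
  · exact (tbl_consistent hm2 hm1 ((cond_iff_Bdry r2 r1).mpr h)).symm

-- B's relation at the top level IS Bdry
lemma rel_iff_Bdry (s : String) (t : List Char) :
    ((true = true ∧ s.toList = t) ∨ ∃ p, s.toList = p ++ '.' :: t) ↔ Bdry s.toList t := by
  unfold Bdry
  simp

lemma main_eq (s : String) : goA s pvPSF.items = goB true s.toList := by
  have hitems : pvPSF.items = pvTable := by rw [pvPSF_eq]
  rw [hitems]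
  cases hA : goA s pvTable with
  | none =>
    cases hB : goB true s.toList with
    | none => rfl
    | some f =>
      obtain ⟨t, hrel, hf⟩ := goB_some s.toList true f hB
      have hmem : (String.ofList t, f) ∈ pvTable := famOf_mem hf
      have hcond := (goA_none_iff s pvTable).mp hA (String.ofList t) f hmem
      have hb : Bdry s.toList (String.ofList t).toList := by
        simpa using (rel_iff_Bdry s t).mp hrel
      rw [(cond_iff_Bdry s (String.ofList t)).mpr hb] at hcond
      exact absurd hcond (by simp)
  | some f =>
    obtain ⟨r1, hm1, hc1⟩ := goA_some_mem s pvTable f hA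
    have hb1 : Bdry s.toList r1.toList := (cond_iff_Bdry s r1).mp hc1
    cases hB : goB true s.toList with
    | none =>
      have hnone := goB_none s.toList true hB r1.toList ((rel_iff_Bdry s r1.toList).mpr hb1)
      have hsome := mem_famOf hm1
      rw [show String.ofList r1.toList = r1 by simp] at hnone
      rw [hnone] at hsome
      cases hsome
    | some f2 =>
      obtain ⟨t, hrel, hf⟩ := goB_some s.toList true f2 hB
      have hm2 : (String.ofList t, f2) ∈ pvTable := famOf_mem hf
      have hb2 : Bdry s.toList (String.ofList t).toList := by
        simpa using (rel_iff_Bdry s t).mp hrel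
      exact congrArg some (families_agree hm1 hm2 hb1 hb2)

-- ===== VERDICT (by name: the statement is the Claim_ definition above) =====
theorem primary_source_family_spec : Claim_equal_primary_source_family := by
  intro domain _
  unfold Spec_primary_source_family primary_source_family primary_source_family_alt
  by_cases hd : domain = ""
  · rw [if_pos (beq_iff_eq.mpr hd), if_pos hd]
  · rw [if_neg (by simpa using hd), if_neg hd]
    exact main_eq (PySem.Str.lower domain)
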